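-- pv_equiv track=rewrite | github.com/wodn3322/Algorithm-Practice | Programmers/Level/Level2/짝지어 제거하기/solution.py | solution
-- ===== SOURCE A (Python) =====
-- def solution(s):
--     answer = -1
--     stringList = list(s)
--
--     stackList = []
--     for i in stringList:
--         if len(stackList) == 0:
--             stackList.append(i)
--             continue
--         if i != stackList[-1]:
--             stackList.append(i)
--         else:
--             stackList.pop()
--     if len(stackList) != 0:
--         answer = 0
--     else:
--         answer = 1
--
--     return answer
-- ===== SOURCE B (Python) =====
-- def solution(s):
--     cur = s
--     while True:
--         out = []
--         i = 0
--         while i < len(cur):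
--             if i + 1 < len(cur) and cur[i] == cur[i + 1]:
--                 i += 2
--             else:
--                 out.append(cur[i])
--                 i += 1
--         nxt = ''.join(out)
--         if nxt == cur:
--             return 1 if cur == '' else 0
--         cur = nxt
-- ===== Notes on version B (the rewrite author's own statement) =====
-- stated objective: alternative
-- what changed: Replaces the single left-to-right stack pass by repeated passes that each delete all non-overlapping adjacent equal pairs, iterating until the string stabilizes; adjacent-pair removal is confluent, so the final emptiness test agrees.
import Mathlib
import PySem

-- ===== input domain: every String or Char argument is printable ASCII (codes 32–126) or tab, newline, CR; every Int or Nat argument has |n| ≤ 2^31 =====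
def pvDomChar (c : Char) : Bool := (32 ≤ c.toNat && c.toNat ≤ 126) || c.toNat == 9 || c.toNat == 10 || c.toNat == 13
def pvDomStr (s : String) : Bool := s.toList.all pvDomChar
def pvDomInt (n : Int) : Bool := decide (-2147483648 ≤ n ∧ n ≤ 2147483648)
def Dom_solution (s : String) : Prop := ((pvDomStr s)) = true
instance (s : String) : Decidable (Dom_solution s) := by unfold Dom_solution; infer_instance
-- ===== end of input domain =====

-- B replaces the single stack pass by repeated remove-all-nonoverlapping-adjacent-pairs passes until the string stabilizes (alternative algorithm, not faster).

-- ===== PORT A =====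
-- A's loop body: push i unless it equals the stack top, else pop
def stepA (st : List Char) (i : Char) : List Char :=
  if st.length = 0 then st ++ [i]
  else match st.getLast? with
    | some last => if i ≠ last then st ++ [i] else st.dropLast
    | none => st ++ [i]  -- unreachable: guarded by length ≠ 0

def solution (s : String) : Int :=
  let stringList := s.toList
  let stackList : List Char := []
  let stackList := stringList.foldl stepA stackList
  let answer := if stackList.length ≠ 0 then (0 : Int) else 1
  answer

-- ===== PORT B =====
-- one inner while-pass of Source B: delete all non-overlapping adjacent equal pairs
def onePass : List Char → List Char
  | [] => []
  | [c] => [c]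
  | a :: b :: t => if a = b then onePass t else a :: onePass (b :: t)

theorem onePass_cons2 (a b : Char) (t : List Char) :
    onePass (a :: b :: t) = if a = b then onePass t else a :: onePass (b :: t) := rfl

theorem onePass_length_le : ∀ l : List Char, (onePass l).length ≤ l.length
  | [] => by simp [onePass]
  | [c] => by simp [onePass]
  | a :: b :: t => by
      by_cases h : a = b
      · have := onePass_length_le t
        rw [onePass_cons2, if_pos h]; simp only [List.length_cons]; omega
      · have := onePass_length_le (b :: t)
        rw [onePass_cons2, if_neg h]; simp only [List.length_cons] at this ⊢; omega

theorem onePass_eq_or_lt : ∀ l : List Char, onePass l = l ∨ (onePass l).length < l.length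
  | [] => Or.inl rfl
  | [c] => Or.inl rfl
  | a :: b :: t => by
      by_cases h : a = b
      · refine Or.inr ?_
        have := onePass_length_le t
        rw [onePass_cons2, if_pos h]; simp only [List.length_cons]; omega
      · rcases onePass_eq_or_lt (b :: t) with heq | hlt
        · exact Or.inl (by rw [onePass_cons2, if_neg h, heq])
        · refine Or.inr ?_
          rw [onePass_cons2, if_neg h]; simp only [List.length_cons] at hlt ⊢; omega

-- the outer while-loop of Source B: iterate onePass until a fixpoint
def fixLoop (cur : List Char) : List Char :=
  let nxt := onePass cur
  if h : nxt = cur then cur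
  else fixLoop nxt
termination_by cur.length
decreasing_by
  rcases onePass_eq_or_lt cur with heq | hlt
  · exact absurd heq h
  · exact hlt

def solution_alt (s : String) : Int :=
  let cur := fixLoop s.toList
  if cur = [] then 1 else 0

-- ===== PRECONDITION & SPEC =====
def Spec_solution (s : String) (out : Int) : Prop := out = solution_alt s
instance (s : String) (out : Int) : Decidable (Spec_solution s out) := by unfold Spec_solution; infer_instance

-- ===== CLAIM (what is proved, stated in full; the proofs are below) =====
def Claim_equal_solution : Prop := ∀ (s : String), Dom_solution s → Spec_solution s (solution s)

-- ===== LEMMAS AND PROOFS =====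

-- A's stack with the top moved to the HEAD (reversed representation), for the proofs
def stepR (st : List Char) (c : Char) : List Char :=
  match st with
  | [] => [c]
  | h :: t => if c = h then t else c :: h :: t

-- A's loop body equals stepR on the reversed stack
theorem stepA_eq (st : List Char) (i : Char) :
    stepA st i = (stepR st.reverse i).reverse := by
  cases hr : st.reverse with
  | nil =>
      have : st = [] := by simpa using congrArg List.reverse hr
      subst this; simp [stepA, stepR]
  | cons h t =>
      have hst : st = t.reverse ++ [h] := by
        have := congrArg List.reverse hr; simpa using this
      subst hst
      by_cases hih : i = h <;>
        simp [stepA, stepR, hih, List.getLast?_append]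

theorem foldA_eq (l : List Char) : ∀ st : List Char,
    List.foldl stepA st l = (List.foldl stepR st.reverse l).reverse := by
  induction l with
  | nil => intro st; simp
  | cons c l ih =>
      intro st
      rw [List.foldl_cons, List.foldl_cons, ih, stepA_eq, List.reverse_reverse]

-- stepR preserves "no two adjacent equal characters"
theorem stepR_chain {st : List Char} (h : List.IsChain (· ≠ ·) st) (c : Char) :
    List.IsChain (· ≠ ·) (stepR st c) := by
  cases st with
  | nil => simp [stepR]
  | cons x t =>
      by_cases hc : c = x
      · simpa [stepR, hc] using h.tail
      · simp only [stepR, if_neg hc]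
        exact List.isChain_cons_cons.mpr ⟨hc, h⟩

-- pushing the same character twice onto a reduced stack is the identity
theorem stepR_cancel {st : List Char} (h : List.IsChain (· ≠ ·) st) (c : Char) :
    stepR (stepR st c) c = st := by
  cases st with
  | nil => simp [stepR]
  | cons x t =>
      by_cases hc : c = x
      · subst hc
        cases t with
        | nil => simp [stepR]
        | cons y u =>
            have hxy : c ≠ y := h.rel_head
            simp [stepR, hxy]
      · simp [stepR, hc]

-- one pass of B does not change A's (reversed) stack computation
theorem foldR_onePass : ∀ (l st : List Char), List.IsChain (· ≠ ·) st →
    List.foldl stepR st (onePass l) = List.foldl stepR st l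
  | [], _, _ => rfl
  | [c], _, _ => rfl
  | a :: b :: t, st, hst => by
      by_cases h : a = b
      · subst h
        rw [onePass_cons2, if_pos rfl]
        rw [foldR_onePass t st hst]
        simp only [List.foldl_cons, stepR_cancel hst]
      · rw [onePass_cons2, if_neg h]
        simp only [List.foldl_cons]
        exact foldR_onePass (b :: t) (stepR st a) (stepR_chain hst a)

-- hence the whole fixpoint loop does not change it either
theorem foldR_fixLoop (l : List Char) :
    List.foldl stepR [] (fixLoop l) = List.foldl stepR [] l := by
  induction l using fixLoop.induct with
  | case1 cur nxt h =>
      have h' : onePass cur = cur := h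
      rw [fixLoop]; simp [h']
  | case2 cur nxt h ih =>
      have h' : ¬ onePass cur = cur := h
      rw [fixLoop]
      simp only [h', dite_false]
      rw [ih]
      exact foldR_onePass cur [] (by simp)

-- a fixpoint of onePass has no adjacent equal pair
theorem onePass_fix_chain : ∀ l : List Char, onePass l = l → List.IsChain (· ≠ ·) l
  | [] , _ => by simp
  | [c], _ => by simp
  | a :: b :: t, h => by
      by_cases hab : a = b
      · exfalso
        subst hab
        rw [onePass_cons2, if_pos rfl] at h
        have h1 := onePass_length_le t
        have h2 := congrArg List.length h
        simp at h2; omega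
      · rw [onePass_cons2, if_neg hab, List.cons.injEq] at h
        exact List.isChain_cons_cons.mpr ⟨hab, onePass_fix_chain (b :: t) h.2⟩

theorem fixLoop_chain (l : List Char) : List.IsChain (· ≠ ·) (fixLoop l) := by
  induction l using fixLoop.induct with
  | case1 cur nxt h =>
      have h' : onePass cur = cur := h
      rw [fixLoop]; simp only [h', dite_true]
      exact onePass_fix_chain cur h'
  | case2 cur nxt h ih =>
      have h' : ¬ onePass cur = cur := h
      rw [fixLoop]; simpa [h'] using ih

-- running A's stack over a reduced word with no cancellation against the stack top
theorem foldR_reduced : ∀ (r st : List Char), List.IsChain (· ≠ ·) r →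
    (∀ c h, r.head? = some c → st.head? = some h → c ≠ h) →
    List.foldl stepR st r = r.reverse ++ st
  | [], st, _, _ => by simp
  | c :: r', st, hr, hhd => by
      have hpush : stepR st c = c :: st := by
        cases st with
        | nil => simp [stepR]
        | cons h t =>
            have : c ≠ h := hhd c h rfl rfl
            simp [stepR, this]
      simp only [List.foldl_cons, hpush]
      rw [foldR_reduced r' (c :: st) hr.tail ?_]
      · simp
      · intro d h hd hh
        cases r' with
        | nil => simp at hd
        | cons e r'' =>
            simp only [List.head?_cons, Option.some.injEq] at hd hh
            subst hd; subst hh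
            exact Ne.symm hr.rel_head

theorem foldR_eq_reverse_fixLoop (l : List Char) :
    List.foldl stepR [] l = (fixLoop l).reverse := by
  rw [← foldR_fixLoop l]
  rw [foldR_reduced (fixLoop l) [] (fixLoop_chain l) (by intro c h _ hh; simp at hh)]
  simp

-- ===== VERDICT (by name: the statement is the Claim_ definition above) =====
theorem solution_spec : Claim_equal_solution := by
  intro s _
  unfold Spec_solution solution solution_alt
  simp only
  rw [foldA_eq]
  simp only [List.reverse_nil, foldR_eq_reverse_fixLoop, List.reverse_reverse]
  rcases h : fixLoop s.toList with _ | _ <;> simp
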